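-- pv_equiv track=rewrite | github.com/Secrettestbot/Super-board-game-game | games/cartographers_heroes.py | _shape_str
-- ===== SOURCE A (Python) =====
-- def _shape_str(shape):
--     if not shape:
--         return "[]"
--     max_r = max(dr for dr, dc in shape) + 1
--     max_c = max(dc for dr, dc in shape) + 1
--     grid = [["." for _ in range(max_c)] for _ in range(max_r)]
--     for dr, dc in shape:
--         grid[dr][dc] = "#"
--     return " | ".join("".join(row) for row in grid)
-- ===== SOURCE B (Python) =====
-- def _shape_str(shape):
--     if not shape:
--         return "[]"
--     max_r = max(dr for dr, dc in shape) + 1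
--     max_c = max(dc for dr, dc in shape) + 1
--     rows = []
--     for r in range(max_r):
--         pieces = []
--         prev = 0
--         for c in sorted({dc for dr, dc in shape if dr == r}):
--             pieces.append("." * (c - prev))
--             pieces.append("#")
--             prev = c + 1
--         pieces.append("." * (max_c - prev))
--         rows.append("".join(pieces))
--     return " | ".join(rows)
-- ===== Notes on version B (the rewrite author's own statement) =====
-- stated objective: alternative
-- what changed: B renders each row sparsely: it sorts the distinct columns of that row and emits runs of dots between consecutive '#' marks, instead of A's allocate-a-dense-mutable-grid, scatter '#'s into it, then join every cell.
-- outside the precondition, e.g. on _shape_str([(2, 0), (-2, 0)]): A returns '. | # | #', B returns '. | . | #'; on _shape_str([(-1, 0)]): A raises IndexError, B returns ''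
import Mathlib
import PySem

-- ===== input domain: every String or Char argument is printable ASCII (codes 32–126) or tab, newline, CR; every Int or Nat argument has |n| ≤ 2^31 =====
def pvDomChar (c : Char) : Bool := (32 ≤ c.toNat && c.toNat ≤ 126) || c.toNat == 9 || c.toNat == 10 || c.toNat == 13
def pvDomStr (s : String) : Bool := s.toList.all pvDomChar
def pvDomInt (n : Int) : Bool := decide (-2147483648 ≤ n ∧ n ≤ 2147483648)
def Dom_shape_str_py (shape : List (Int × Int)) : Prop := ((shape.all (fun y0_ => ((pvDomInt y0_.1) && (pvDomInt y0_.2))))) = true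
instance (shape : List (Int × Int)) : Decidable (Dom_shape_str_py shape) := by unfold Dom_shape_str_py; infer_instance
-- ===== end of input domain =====

-- B replaces A's dense allocate-then-scatter grid by a sparse sort-then-scan: per row it
-- sorts the distinct columns and emits runs of dots between consecutive '#' marks
-- (objective: alternative; no full-grid mutable buffer).

-- ===== PORT A =====
-- A-side helper: the scatter loop 'for dr, dc in shape: grid[dr][dc] = "#"'
def pvScatterA (g : List (List String)) (s : List (Int × Int)) : List (List String) :=
  s.foldl (fun g p =>
    PySem.List.pySetD g p.1 (PySem.List.pySetD (PySem.List.pyGetD g p.1 []) p.2 "#")) g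

def shape_str_py (shape : List (Int × Int)) : String :=
  if shape = [] then "[]"
  else
    let max_r : Int := ((PySem.List.max? (shape.map (fun p => p.1)) (fun x => x)).getD 0) + 1
    let max_c : Int := ((PySem.List.max? (shape.map (fun p => p.2)) (fun x => x)).getD 0) + 1
    let grid0 : List (List String) :=
      (PySem.List.pyRange 0 max_r 1).map (fun _ =>
        (PySem.List.pyRange 0 max_c 1).map (fun _ => "."))
    PySem.Str.join " | " ((pvScatterA grid0 shape).map (fun row => PySem.Str.join "" row))

-- ===== PORT B =====
-- '"." * n' — Python string repetition, ported exactly as character repetition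
def pvDots (n : Int) : String := String.ofList (PySem.List.pyRepeat ['.'] n)

-- one output row: sorted distinct columns of row r, dots filled between the '#'s
def pvRowB (shape : List (Int × Int)) (r max_c : Int) : String :=
  let cols : List Int :=
    PySem.List.sorted (PySem.Set.ofList ((shape.filter (fun p => p.1 == r)).map (fun p => p.2))) (fun x => x)
  let st := cols.foldl (fun (acc : List String × Int) c =>
    (acc.1 ++ [pvDots (c - acc.2), "#"], c + 1)) ([], 0)
  PySem.Str.join "" (st.1 ++ [pvDots (max_c - st.2)])

def shape_str_py_alt (shape : List (Int × Int)) : String :=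
  if shape = [] then "[]"
  else
    let max_r : Int := ((PySem.List.max? (shape.map (fun p => p.1)) (fun x => x)).getD 0) + 1
    let max_c : Int := ((PySem.List.max? (shape.map (fun p => p.2)) (fun x => x)).getD 0) + 1
    PySem.Str.join " | " ((PySem.List.pyRange 0 max_r 1).map (fun r => pvRowB shape r max_c))

-- ===== PRECONDITION & SPEC =====
-- Pre_ restricts to the renderer's natural domain of nonnegative offsets: on shapes with a
-- negative offset A either raises IndexError or scatters into wrapped rows/columns through
-- Python's negative list indexing — an artefact of the mutable-grid implementation.
def Pre_shape_str_py (shape : List (Int × Int)) : Prop :=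
  ∀ p ∈ shape, 0 ≤ p.1 ∧ 0 ≤ p.2
instance (shape : List (Int × Int)) : Decidable (Pre_shape_str_py shape) := by
  unfold Pre_shape_str_py; infer_instance

def pvWitness_shape_str_py : (List (Int × Int)) := ([(0, 0), (1, 2), (1, 0)])

def Spec_shape_str_py (shape : List (Int × Int)) (out : String) : Prop := out = shape_str_py_alt shape
instance (shape : List (Int × Int)) (out : String) : Decidable (Spec_shape_str_py shape out) := by
  unfold Spec_shape_str_py; infer_instance

-- ===== CLAIM (what is proved, stated in full; the proofs are below) =====
def Claim_equal_shape_str_py : Prop := ∀ (shape : List (Int × Int)), Dom_shape_str_py shape → Pre_shape_str_py shape → Spec_shape_str_py shape (shape_str_py shape)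

-- ===== LEMMAS AND PROOFS =====

-- Characterisation of A's scatter loop on an in-range, nonnegative shape:
-- lengths are preserved and a cell holds "#" exactly when it is in the shape.
lemma pvScatterA_spec (C : Nat) (s : List (Int × Int)) :
    ∀ (g : List (List String)),
    (∀ row ∈ g, row.length = C) →
    (∀ p ∈ s, 0 ≤ p.1 ∧ p.1 < (g.length : Int) ∧ 0 ≤ p.2 ∧ p.2 < (C : Int)) →
    (pvScatterA g s).length = g.length ∧
    (∀ row ∈ pvScatterA g s, row.length = C) ∧
    (∀ k j : Nat, k < g.length → j < C →
      ((pvScatterA g s).getD k []).getD j "" =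
        if ((k : Int), (j : Int)) ∈ s then "#" else (g.getD k []).getD j "") := by
  induction s with
  | nil =>
      intro g hrow _
      refine ⟨rfl, hrow, ?_⟩
      intro k j _ _
      simp [pvScatterA]
  | cons p s ih =>
      intro g hrow hb
      obtain ⟨h1, h2, h3, h4⟩ := hb p (List.mem_cons_self)
      have ha : p.1.toNat < g.length := by omega
      have hbC : p.2.toNat < C := by omega
      have hrowa : g.getD p.1.toNat [] = g[p.1.toNat] := List.getD_eq_getElem g [] ha
      have hstep : pvScatterA g (p :: s) =
          pvScatterA (g.set p.1.toNat ((g.getD p.1.toNat []).set p.2.toNat "#")) s := by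
        simp [pvScatterA, PySem.List.pySetD_of_nonneg _ _ h1,
              PySem.List.pySetD_of_nonneg _ _ h3, PySem.List.pyGetD_of_nonneg _ _ h1]
      set g' := g.set p.1.toNat ((g.getD p.1.toNat []).set p.2.toNat "#") with hg'
      have hlen' : g'.length = g.length := List.length_set ..
      have hrow' : ∀ row ∈ g', row.length = C := by
        intro row hr
        rcases List.mem_or_eq_of_mem_set hr with h | h
        · exact hrow _ h
        · subst h
          rw [List.length_set]
          exact hrow _ (hrowa ▸ List.getElem_mem ha)
      have hb' : ∀ q ∈ s, 0 ≤ q.1 ∧ q.1 < (g'.length : Int) ∧ 0 ≤ q.2 ∧ q.2 < (C : Int) := by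
        intro q hq
        have := hb q (List.mem_cons_of_mem _ hq)
        rw [hlen']
        exact this
      obtain ⟨l1, l2, l3⟩ := ih g' hrow' hb'
      refine ⟨by rw [hstep, l1, hlen'], by rw [hstep]; exact l2, ?_⟩
      intro k j hk hj
      rw [hstep, l3 k j (by omega) hj]
      have hrowlen : (g.getD k []).length = C :=
        hrow _ ((List.getD_eq_getElem g [] hk) ▸ List.getElem_mem hk)
      have hpe : (((k : Int), (j : Int)) = p) ↔ (k = p.1.toNat ∧ j = p.2.toNat) := by
        constructor
        · intro h
          have h1' := congrArg Prod.fst h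
          have h2' := congrArg Prod.snd h
          simp at h1' h2'
          omega
        · rintro ⟨rfl, rfl⟩
          have : ((p.1.toNat : Int), (p.2.toNat : Int)) = (p.1, p.2) := by
            rw [Int.toNat_of_nonneg h1, Int.toNat_of_nonneg h3]
          simpa using this
      have hg'k : g'.getD k [] =
          if p.1.toNat = k then (g.getD p.1.toNat []).set p.2.toNat "#" else g.getD k [] := by
        rw [hg', List.getD_eq_getElem _ [] (by rw [List.length_set]; exact hk),
            List.getElem_set]
        split_ifs with he
        · rfl
        · exact (List.getD_eq_getElem g [] hk).symm
      by_cases hs : ((k : Int), (j : Int)) ∈ s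
      · simp [hs, List.mem_cons_of_mem _ hs]
      · rw [if_neg hs]
        have hrhs : (if ((k : Int), (j : Int)) ∈ p :: s then "#" else (g.getD k []).getD j "") =
            (if ((k : Int), (j : Int)) = p then "#" else (g.getD k []).getD j "") := by
          simp [List.mem_cons, hs]
        rw [hrhs]
        by_cases hka : p.1.toNat = k
        · subst hka
          rw [hg'k, if_pos rfl]
          rw [List.getD_eq_getElem _ "" (by rw [List.length_set]; omega), List.getElem_set]
          by_cases hjb : j = p.2.toNat
          · rw [if_pos hjb.symm, if_pos (hpe.mpr ⟨rfl, hjb⟩)]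
          · rw [if_neg (fun h => hjb h.symm),
                if_neg (fun h => hjb (hpe.mp h).2),
                ← List.getD_eq_getElem _ "" (by omega)]
        · rw [hg'k, if_neg hka, if_neg (fun h => hka ((hpe.mp h).1).symm)]

-- join with empty separator is concatenation
lemma pvJoinNil_flatten : ∀ (xs : List (List Char)),
    PySem.Chars.join [] xs = xs.flatten := by
  intro xs
  induction xs with
  | nil => simp [PySem.Chars.join_nil]
  | cons x xs ih =>
      cases xs with
      | nil => simp [PySem.Chars.join_singleton]
      | cons y ys =>
          rw [PySem.Chars.join_cons_cons]
          simp_all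

-- B's row-building foldl: the pieces accumulator only ever grows on the right
lemma pvFoldB_acc : ∀ (cols : List Int) (ps : List String) (prev : Int),
    cols.foldl (fun (acc : List String × Int) c =>
      (acc.1 ++ [pvDots (c - acc.2), "#"], c + 1)) (ps, prev) =
    (ps ++ (cols.foldl (fun (acc : List String × Int) c =>
      (acc.1 ++ [pvDots (c - acc.2), "#"], c + 1)) ([], prev)).1,
     (cols.foldl (fun (acc : List String × Int) c =>
      (acc.1 ++ [pvDots (c - acc.2), "#"], c + 1)) ([], prev)).2) := by
  intro cols
  induction cols with
  | nil => intro ps prev; simp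
  | cons c cs ih =>
      intro ps prev
      simp only [List.foldl_cons, List.nil_append]
      rw [ih (ps ++ [pvDots (c - prev), "#"]) (c + 1),
          ih ([pvDots (c - prev), "#"]) (c + 1)]
      simp

-- gap-fill characterisation: joining the pieces of a strictly increasing column list
-- yields exactly the dense row of '#'/'.' characters
lemma pvGap (C : Int) : ∀ (cols : List Int) (prev : Int), 0 ≤ prev → prev ≤ C →
    cols.Pairwise (· < ·) →
    (∀ c ∈ cols, prev ≤ c ∧ c < C) →
    (((cols.foldl (fun (acc : List String × Int) c =>
        (acc.1 ++ [pvDots (c - acc.2), "#"], c + 1)) ([], prev)).1 ++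
      [pvDots (C - (cols.foldl (fun (acc : List String × Int) c =>
        (acc.1 ++ [pvDots (c - acc.2), "#"], c + 1)) ([], prev)).2)]).map String.toList).flatten =
    (List.range (C - prev).toNat).map (fun j : Nat => if (prev + (j : Int)) ∈ cols then '#' else '.') := by
  intro cols
  induction cols with
  | nil =>
      intro prev h0 hC _ _
      simp [pvDots, PySem.List.pyRepeat_singleton, List.map_const']
  | cons c cs ih =>
      intro prev h0 hC hpw hb
      obtain ⟨hc1, hc2⟩ := hb c List.mem_cons_self
      have hcs : ∀ x ∈ cs, c < x := (List.pairwise_cons.mp hpw).1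
      have hpw' : cs.Pairwise (· < ·) := (List.pairwise_cons.mp hpw).2
      have hb' : ∀ x ∈ cs, c + 1 ≤ x ∧ x < C := fun x hx =>
        ⟨by have := hcs x hx; omega, (hb x (List.mem_cons_of_mem _ hx)).2⟩
      have ihh := ih (c + 1) (by omega) (by omega) hpw' hb'
      simp only [List.foldl_cons, List.nil_append]
      rw [pvFoldB_acc]
      set F := cs.foldl (fun (acc : List String × Int) c =>
        (acc.1 ++ [pvDots (c - acc.2), "#"], c + 1)) ([], c + 1) with hF
      set a := (c - prev).toNat with ha
      have hshape : ([pvDots (c - prev), "#"] ++ F.1) ++ [pvDots (C - F.2)] =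
          pvDots (c - prev) :: "#" :: (F.1 ++ [pvDots (C - F.2)]) := by simp
      rw [hshape]
      simp only [List.map_cons, List.flatten_cons]
      rw [ihh]
      have hdl : (pvDots (c - prev)).toList = List.replicate a '.' := by
        simp [pvDots, PySem.List.pyRepeat_singleton, ha]
      have hhl : ("#" : String).toList = ['#'] := by simp
      rw [hdl, hhl]
      set m := (C - (c + 1)).toNat with hm
      have hsplit : (C - prev).toNat = a + 1 + m := by omega
      rw [hsplit, List.range_add, List.range_succ]
      rw [List.map_append, List.map_append, List.map_map]
      have h1 : (List.range a).map (fun j : Nat => if (prev + (j : Int)) ∈ c :: cs then '#' else '.') =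
          List.replicate a '.' := by
        rw [List.map_congr_left (g := fun _ => '.') ?_, List.map_const', List.length_range]
        intro j hj
        have hj' : j < a := List.mem_range.mp hj
        have hnm : (prev + (j : Int)) ∉ c :: cs := by
          intro hmem
          rcases List.mem_cons.mp hmem with h | h
          · omega
          · have := hcs _ h; omega
        simp [hnm]
      have h2 : ([a].map (fun j : Nat => if (prev + (j : Int)) ∈ c :: cs then '#' else '.')) = ['#'] := by
        have hca : prev + (a : Int) = c := by omega
        simp [hca]
      have h3 : (List.range m).map ((fun j : Nat => if (prev + (j : Int)) ∈ c :: cs then '#' else '.') ∘ (fun x => a + 1 + x)) =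
          (List.range m).map (fun j : Nat => if ((c + 1) + (j : Int)) ∈ cs then '#' else '.') := by
        apply List.map_congr_left
        intro j hj
        have heq : prev + ((a + 1 + j : Nat) : Int) = (c + 1) + (j : Int) := by push_cast; omega
        have hne : (c + 1) + (j : Int) ≠ c := by omega
        simp only [Function.comp_apply, heq, List.mem_cons, hne, false_or]
      rw [h1, h2, h3]
      simp

-- membership in B's sorted distinct column list of row r, read back in the shape
lemma pvMemCols (shape : List (Int × Int)) (r x : Int) :
    x ∈ PySem.List.sorted (PySem.Set.ofList ((shape.filter (fun p => p.1 == r)).map (fun p => p.2))) (fun x => x) ↔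
    (r, x) ∈ shape := by
  rw [PySem.List.mem_sorted, PySem.Set.mem_ofList]
  constructor
  · intro hx
    obtain ⟨p, hp, rfl⟩ := List.mem_map.mp hx
    obtain ⟨hps, hpr⟩ := List.mem_filter.mp hp
    have h1 : p.1 = r := by simpa using hpr
    have : p = (r, p.2) := by cases p; simp_all
    rw [← this]
    exact hps
  · intro h
    exact List.mem_map.mpr ⟨(r, x), List.mem_filter.mpr ⟨h, by simp⟩, rfl⟩

theorem shape_str_py_spec : Claim_equal_shape_str_py := by
  unfold Claim_equal_shape_str_py
  intro shape _ hpre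
  unfold Spec_shape_str_py
  by_cases hs : shape = []
  · subst hs; rfl
  · simp only [shape_str_py, shape_str_py_alt, if_neg hs]
    obtain ⟨mr, hmr⟩ : ∃ m, PySem.List.max? (shape.map (fun p => p.1)) (fun x => x) = some m := by
      cases h : PySem.List.max? (shape.map (fun p => p.1)) (fun x => x) with
      | none => exact absurd (by simpa using (PySem.List.max?_eq_none_iff _ _).mp h) hs
      | some m => exact ⟨m, rfl⟩
    obtain ⟨mc, hmc⟩ : ∃ m, PySem.List.max? (shape.map (fun p => p.2)) (fun x => x) = some m := by
      cases h : PySem.List.max? (shape.map (fun p => p.2)) (fun x => x) with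
      | none => exact absurd (by simpa using (PySem.List.max?_eq_none_iff _ _).mp h) hs
      | some m => exact ⟨m, rfl⟩
    obtain ⟨pr, hprmem, hpr⟩ := List.mem_map.mp (PySem.List.max?_mem hmr)
    obtain ⟨pc, hpcmem, hpc⟩ := List.mem_map.mp (PySem.List.max?_mem hmc)
    have hmr0 : 0 ≤ mr := hpr ▸ (hpre pr hprmem).1
    have hmc0 : 0 ≤ mc := hpc ▸ (hpre pc hpcmem).2
    have hmaxr : ∀ p ∈ shape, p.1 ≤ mr := fun p hp =>
      PySem.List.max?_isMax hmr _ (List.mem_map_of_mem hp)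
    have hmaxc : ∀ p ∈ shape, p.2 ≤ mc := fun p hp =>
      PySem.List.max?_isMax hmc _ (List.mem_map_of_mem hp)
    rw [hmr, hmc]
    simp only [Option.getD_some]
    set R : Nat := (mr + 1).toNat with hR
    set C : Nat := (mc + 1).toNat with hC
    have hRI : ((R : Int)) = mr + 1 := Int.toNat_of_nonneg (by omega)
    have hCI : ((C : Int)) = mc + 1 := Int.toNat_of_nonneg (by omega)
    set grid0 : List (List String) :=
      (PySem.List.pyRange 0 (mr + 1) 1).map (fun _ =>
        (PySem.List.pyRange 0 (mc + 1) 1).map (fun _ => ".")) with hgrid0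
    have hlen0 : grid0.length = R := by
      simp [hgrid0, PySem.List.length_pyRange_one, hR]
    have hrow0 : ∀ row ∈ grid0, row.length = C := by
      intro row hr
      simp only [hgrid0, List.mem_map] at hr
      obtain ⟨_, _, rfl⟩ := hr
      simp [PySem.List.length_pyRange_one, hC]
    have hb : ∀ p ∈ shape, 0 ≤ p.1 ∧ p.1 < (grid0.length : Int) ∧ 0 ≤ p.2 ∧ p.2 < (C : Int) := by
      intro p hp
      have h1 := (hpre p hp).1
      have h2 := (hpre p hp).2
      have h3 := hmaxr p hp
      have h4 := hmaxc p hp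
      rw [hlen0, hRI, hCI]
      exact ⟨h1, by omega, h2, by omega⟩
    obtain ⟨l1, l2, l3⟩ := pvScatterA_spec C shape grid0 hrow0 hb
    have hentry0 : ∀ k j : Nat, k < R → j < C → (grid0.getD k []).getD j "" = "." := by
      intro k j hk hj
      have : grid0.getD k [] = (PySem.List.pyRange 0 (mc + 1) 1).map (fun _ => ".") := by
        rw [List.getD_eq_getElem _ [] (by omega : k < grid0.length)]
        simp [hgrid0]
      rw [this, List.getD_eq_getElem _ "" (by simp [PySem.List.length_pyRange_one, ← hC]; omega)]
      simp
    congr 1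
    apply List.ext_getElem
    · simp [l1, hlen0, PySem.List.length_pyRange_one, hR]
    · intro k hk1 hk2
      have hkR : k < R := by simpa [l1, hlen0] using hk1
      simp only [List.getElem_map, PySem.List.getElem_pyRange_one, zero_add]
      apply String.toList_inj.mp
      -- A side: the k-th scattered row joined with "" is the dense character row
      have hkl : k < (pvScatterA grid0 shape).length := by omega
      have hrmem : (pvScatterA grid0 shape)[k] ∈ pvScatterA grid0 shape := List.getElem_mem hkl
      have hrowlen : ((pvScatterA grid0 shape)[k]).length = C := l2 _ hrmem
      have hrowchars : ((pvScatterA grid0 shape)[k]).map String.toList =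
          ((List.range C).map (fun j : Nat =>
            if ((k : Int), (j : Int)) ∈ shape then '#' else '.')).map (fun ch => [ch]) := by
        apply List.ext_getElem
        · simp [hrowlen]
        · intro j hj1 hj2
          have hjC : j < C := by simpa [hrowlen] using hj1
          have hjl : j < ((pvScatterA grid0 shape)[k]).length := by omega
          have he := l3 k j (by omega) hjC
          rw [hentry0 k j hkR hjC] at he
          have hgd : ((pvScatterA grid0 shape)[k])[j] =
              (if ((k : Int), (j : Int)) ∈ shape then "#" else ".") := by
            rw [← he, List.getD_eq_getElem _ [] hkl, List.getD_eq_getElem _ "" hjl]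
          simp only [List.getElem_map, List.getElem_range, hgd]
          split_ifs <;> simp
      rw [PySem.Str.toList_join, hrowchars]
      have hsep : ("" : String).toList = [] := by simp
      rw [hsep, PySem.Chars.join_nil_singletons]
      -- B side: the gap-filled row is the same dense character row
      simp only [pvRowB]
      set cols : List Int := PySem.List.sorted
        (PySem.Set.ofList ((shape.filter (fun p => p.1 == (k : Int))).map (fun p => p.2)))
        (fun x => x) with hcols
      have hpw : cols.Pairwise (· < ·) := PySem.List.sorted_ofList_pairwise_lt _
      have hbnd : ∀ x ∈ cols, (0 : Int) ≤ x ∧ x < mc + 1 := by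
        intro x hx
        have hm := (pvMemCols shape (k : Int) x).mp hx
        exact ⟨(hpre _ hm).2, by have := hmaxc _ hm; omega⟩
      have hgap := pvGap (mc + 1) cols 0 le_rfl (by omega) hpw hbnd
      rw [PySem.Str.toList_join, hsep, pvJoinNil_flatten, hgap]
      have hCeq : ((mc + 1 : Int) - 0).toNat = C := by omega
      rw [hCeq]
      apply List.map_congr_left
      intro j hj
      by_cases hmem : ((k : Int), (j : Int)) ∈ shape
      · rw [if_pos hmem, if_pos (by rw [zero_add]; exact (pvMemCols shape _ _).mpr hmem)]
      · rw [if_neg hmem, if_neg (by rw [zero_add]; exact fun h => hmem ((pvMemCols shape _ _).mp h))]
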